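-- pv_equiv track=rewrite | github.com/chylkov/HSEworkspace | another_list_homework_Serdyuk.py | triangle_1
-- ===== SOURCE A (Python) =====
-- def triangle_1(N):
--     matrix = []
--     for i in range(N):
--         row = []
--         for j in range(N):
--             if (i <= j):
--                 row.append(1)
--             else:
--                 row.append(0)
--         matrix.append(row)
--     return matrix
-- ===== SOURCE B (Python) =====
-- def triangle_1(N):
--     return [[0] * i + [1] * (N - i) for i in range(N)]
-- ===== Notes on version B (the rewrite author's own statement) =====
-- stated objective: simpler
-- what changed: Each row is built arithmetically as [0]*i + [1]*(N-i) by counting zeros and ones, eliminating the inner loop with its per-cell i<=j branch.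
import Mathlib
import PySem

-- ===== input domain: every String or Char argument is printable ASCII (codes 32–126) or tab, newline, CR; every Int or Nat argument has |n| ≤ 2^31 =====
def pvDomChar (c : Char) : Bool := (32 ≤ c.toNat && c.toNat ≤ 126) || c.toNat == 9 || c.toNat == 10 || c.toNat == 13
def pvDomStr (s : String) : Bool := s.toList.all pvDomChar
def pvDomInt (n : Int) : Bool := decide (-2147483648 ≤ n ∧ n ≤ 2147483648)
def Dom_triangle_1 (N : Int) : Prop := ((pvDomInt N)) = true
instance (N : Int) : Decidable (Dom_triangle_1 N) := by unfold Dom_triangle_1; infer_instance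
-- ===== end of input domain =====

-- ===== PORT A =====
-- B builds each row by counting: i zeros then N-i ones, no per-cell branch (objective: simpler).
def triangle_1 (N : Int) : List (List Int) :=
  (PySem.List.pyRange 0 N 1).foldl
    (fun matrix i =>
      matrix ++ [(PySem.List.pyRange 0 N 1).foldl
        (fun row j => if i ≤ j then row ++ [1] else row ++ [0]) []])
    []

-- ===== PORT B =====
def triangle_1_alt (N : Int) : List (List Int) :=
  (PySem.List.pyRange 0 N 1).map
    (fun i => List.replicate i.toNat 0 ++ List.replicate (N - i).toNat 1)

-- ===== PRECONDITION & SPEC =====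
def Spec_triangle_1 (N : Int) (out : List (List Int)) : Prop := out = triangle_1_alt N
instance (N : Int) (out : List (List Int)) : Decidable (Spec_triangle_1 N out) := by unfold Spec_triangle_1; infer_instance

-- ===== CLAIM (what is proved, stated in full; the proofs are below) =====
def Claim_equal_triangle_1 : Prop := ∀ (N : Int), Dom_triangle_1 N → Spec_triangle_1 N (triangle_1 N)

-- ===== LEMMAS AND PROOFS =====

-- ===== VERDICT (by name: the statement is the Claim_ definition above) =====
lemma row_eq (N i : Int) (h0 : 0 ≤ i) (hN : i < N) :
    (PySem.List.pyRange 0 N 1).foldl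
      (fun row j => if i ≤ j then row ++ [1] else row ++ [0]) ([] : List Int)
    = List.replicate i.toNat 0 ++ List.replicate (N - i).toNat 1 := by
  have hstep : (fun (row : List Int) j => if i ≤ j then row ++ [1] else row ++ [0])
      = fun row j => row ++ [if i ≤ j then (1 : Int) else 0] := by
    funext row j; split_ifs <;> rfl
  rw [hstep, PySem.List.foldl_append_singleton_eq_map, List.nil_append,
      PySem.List.pyRange_one_append 0 i N h0 (le_of_lt hN), List.map_append]
  congr 1
  · apply List.eq_replicate_iff.mpr
    refine ⟨?_, ?_⟩
    · rw [List.length_map, PySem.List.length_pyRange_one]; omega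
    · intro x hx
      obtain ⟨j, hj, rfl⟩ := List.mem_map.mp hx
      have := (PySem.List.mem_pyRange_one).mp hj
      simp [show ¬ i ≤ j by omega]
  · apply List.eq_replicate_iff.mpr
    constructor
    · rw [List.length_map, PySem.List.length_pyRange_one]
    · intro x hx
      obtain ⟨j, hj, rfl⟩ := List.mem_map.mp hx
      have := (PySem.List.mem_pyRange_one).mp hj
      simp [show i ≤ j by omega]

theorem triangle_1_spec : Claim_equal_triangle_1 := by
  intro N _
  unfold Spec_triangle_1 triangle_1 triangle_1_alt
  rw [PySem.List.foldl_append_singleton_eq_map, List.nil_append]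
  apply List.map_congr_left
  intro i hi
  have := (PySem.List.mem_pyRange_one).mp hi
  exact row_eq N i this.1 this.2
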